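-- pv_equiv track=rewrite | github.com/ruby199/GitHub_rubin | Medium/max_number_of_k_sum_pairs.py | maxOperations_bruteForce
-- ===== SOURCE A (Python) =====
-- from collections import defaultdict
--
-- def maxOperations_bruteForce(nums, k) -> int:
--     count_map = defaultdict(int)
--     count = 0
--
--     # build the hashmap with count of occurence of every element in array
--     for num in nums:
--         count_map[num] += 1
--
--     for num in nums:
--         current = num
--         complement = k - num
--         if count_map[current] > 0 and count_map[complement] > 0:
--             if current == complement and count_map[current] < 2:
--                 continue
--             count_map[current] -= 1
--             count_map[complement] -= 1
--             count += 1
--     return count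
-- ===== SOURCE B (Python) =====
-- from collections import Counter
--
-- def maxOperations_bruteForce(nums, k) -> int:
--     # Closed-form over the multiset: each unordered value pair {a, k-a}
--     # contributes min(cnt[a], cnt[k-a]) pairs (cnt[a] // 2 when a == k-a).
--     cnt = Counter(nums)
--     total = 0
--     for a in cnt:
--         b = k - a
--         if a < b:
--             total += min(cnt[a], cnt[b])
--         elif a == b:
--             total += cnt[a] // 2
--     return total
-- ===== Notes on version B (the rewrite author's own statement) =====
-- stated objective: faster
-- what changed: A simulates the greedy pair removal by decrementing a count map while re-scanning the whole array element by element; B computes the answer in closed form from a Counter: one pass over the distinct values adding min(cnt[a], cnt[k-a]) per unordered pair (cnt[a]//2 when a == k-a).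
import Mathlib
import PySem

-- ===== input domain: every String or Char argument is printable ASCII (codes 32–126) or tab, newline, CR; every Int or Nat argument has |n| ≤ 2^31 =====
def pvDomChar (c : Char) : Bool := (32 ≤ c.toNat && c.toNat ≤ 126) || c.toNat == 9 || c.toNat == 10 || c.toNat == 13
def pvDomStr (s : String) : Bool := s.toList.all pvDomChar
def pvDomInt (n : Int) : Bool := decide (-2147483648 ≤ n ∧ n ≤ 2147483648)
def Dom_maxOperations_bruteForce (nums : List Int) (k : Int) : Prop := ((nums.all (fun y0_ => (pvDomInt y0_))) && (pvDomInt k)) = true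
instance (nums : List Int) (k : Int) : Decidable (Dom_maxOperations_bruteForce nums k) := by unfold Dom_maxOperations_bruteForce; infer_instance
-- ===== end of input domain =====

-- B replaces A's greedy map-decrementing re-scan of the whole array by a closed-form sum over
-- the distinct values (min of the two counts per unordered pair {a, k-a}); same O(n), measured
-- constant-factor faster (one pass over distinct values instead of per-element dict updates).

-- ===== PORT A =====
-- loop body of A's second 'for num in nums' loop (state = (count_map, count))
def pvBodyA (k : Int) (st : PySem.Dict Int Int × Int) (num : Int) : PySem.Dict Int Int × Int :=
  let current := num
  let complement := k - num
  if st.1.getD current 0 > 0 ∧ st.1.getD complement 0 > 0 then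
    if current = complement ∧ st.1.getD current 0 < 2 then st
    else ((st.1.modify current 0 (· - 1)).modify complement 0 (· - 1), st.2 + 1)
  else st

def maxOperations_bruteForce (nums : List Int) (k : Int) : Int :=
  -- count_map = defaultdict(int); for num in nums: count_map[num] += 1
  let count_map : PySem.Dict Int Int :=
    nums.foldl (fun d num => d.modify num 0 (· + 1)) PySem.Dict.empty
  (nums.foldl (pvBodyA k) (count_map, 0)).2

-- ===== PORT B =====
-- loop body of B's 'for a in cnt' loop
def pvBodyB (cnt : PySem.Dict Int Int) (k total a : Int) : Int :=
  let b := k - a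
  if a < b then total + min (cnt.getD a 0) (cnt.getD b 0)
  else if a = b then total + PySem.Int.floordiv (cnt.getD a 0) 2
  else total

def maxOperations_bruteForce_alt (nums : List Int) (k : Int) : Int :=
  let cnt : PySem.Dict Int Int := PySem.Dict.counter nums
  cnt.keys.foldl (pvBodyB cnt k) 0

-- ===== PRECONDITION & SPEC =====
def Spec_maxOperations_bruteForce (nums : List Int) (k : Int) (out : Int) : Prop := out = maxOperations_bruteForce_alt nums k
instance (nums : List Int) (k : Int) (out : Int) : Decidable (Spec_maxOperations_bruteForce nums k out) := by unfold Spec_maxOperations_bruteForce; infer_instance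

-- ===== CLAIM (what is proved, stated in full; the proofs are below) =====
def Claim_equal_maxOperations_bruteForce : Prop := ∀ (nums : List Int) (k : Int), Dom_maxOperations_bruteForce nums k → Spec_maxOperations_bruteForce nums k (maxOperations_bruteForce nums k)

-- ===== LEMMAS AND PROOFS =====

-- pvHterm nums k p a: pairs the greedy A has formed for the class {a, k-a}, charged to the
-- smaller class member, after processing prefix p of nums.
def pvHterm (nums : List Int) (k : Int) (p : List Int) (a : Int) : Nat :=
  if a < k - a then min (p.count a + p.count (k - a)) (min (nums.count a) (nums.count (k - a)))
  else if a = k - a then min (p.count a) (nums.count a / 2)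
  else 0

-- elements of value v consumed by A after processing prefix p
def pvConsumed (nums : List Int) (k : Int) (p : List Int) (v : Int) : Nat :=
  if v = k - v then 2 * min (p.count v) (nums.count v / 2)
  else min (p.count v + p.count (k - v)) (min (nums.count v) (nums.count (k - v)))

def pvHsum (nums : List Int) (k : Int) (p : List Int) : Nat :=
  ((PySem.Set.ofList nums).map (pvHterm nums k p)).sum

lemma pvConsumed_pair (nums : List Int) (k : Int) (p : List Int) (x : Int) (hx : ¬ x = k - x) :
    pvConsumed nums k p (k - x) = pvConsumed nums k p x := by
  unfold pvConsumed
  rw [show k - (k - x) = x from by ring]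
  rw [if_neg (by omega), if_neg hx]
  omega

lemma pvConsumed_congr (nums : List Int) (k : Int) {p q : List Int} (v : Int)
    (h1 : p.count v = q.count v) (h2 : p.count (k - v) = q.count (k - v)) :
    pvConsumed nums k p v = pvConsumed nums k q v := by
  unfold pvConsumed; rw [h1, h2]

lemma pvHterm_congr (nums : List Int) (k : Int) {p q : List Int} (a : Int)
    (h1 : p.count a = q.count a) (h2 : p.count (k - a) = q.count (k - a)) :
    pvHterm nums k p a = pvHterm nums k q a := by
  unfold pvHterm; rw [h1, h2]

lemma pvSum_update (f g : Int → Nat) (a0 : Int) (S : List Int) (hnd : S.Nodup)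
    (hag : ∀ a ∈ S, a ≠ a0 → f a = g a) :
    (S.map g).sum + (if a0 ∈ S then f a0 else 0) = (S.map f).sum + (if a0 ∈ S then g a0 else 0) := by
  induction S with
  | nil => simp
  | cons b S ih =>
    rcases List.nodup_cons.mp hnd with ⟨hb, hnd'⟩
    by_cases hba : b = a0
    · subst hba
      have hnotin : b ∉ S := hb
      have hmap : S.map g = S.map f := by
        apply List.map_congr_left
        intro a ha
        exact (hag a (List.mem_cons_of_mem _ ha) (fun h => hnotin (h ▸ ha))).symm
      simp [hmap, List.mem_cons]
      omega
    · have hfb : f b = g b := hag b (List.mem_cons_self) hba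
      have := ih hnd' (fun a ha hne => hag a (List.mem_cons_of_mem _ ha) hne)
      have hab : (a0 = b) = False := by
        simp only [eq_iff_iff, iff_false]
        exact fun h => hba h.symm
      by_cases hmem : a0 ∈ S <;>
        simp [List.mem_cons, hmem, hab, hfb] at this ⊢ <;> omega

lemma pvCount_append (p : List Int) (x v : Int) :
    (p ++ [x]).count v = p.count v + (if v = x then 1 else 0) := by
  simp only [List.count_append, List.count_singleton']
  split_ifs with h1 h2 <;> omega

lemma pvConsumed_self {x k : Int} (nums p : List Int) (hx : x = k - x) :
    pvConsumed nums k p x = 2 * min (p.count x) (nums.count x / 2) := by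
  unfold pvConsumed; rw [if_pos hx]

lemma pvConsumed_of_ne {x k : Int} (nums p : List Int) (hx : ¬ x = k - x) :
    pvConsumed nums k p x
      = min (p.count x + p.count (k - x)) (min (nums.count x) (nums.count (k - x))) := by
  unfold pvConsumed; rw [if_neg hx]

lemma pvHterm_lt {x k : Int} (nums p : List Int) (h : x < k - x) :
    pvHterm nums k p x
      = min (p.count x + p.count (k - x)) (min (nums.count x) (nums.count (k - x))) := by
  unfold pvHterm; rw [if_pos h]

lemma pvHterm_eqc {x k : Int} (nums p : List Int) (h : x = k - x) :
    pvHterm nums k p x = min (p.count x) (nums.count x / 2) := by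
  unfold pvHterm; rw [if_neg (by omega), if_pos h]

lemma pvHterm_gt {x k : Int} (nums p : List Int) (h : k - x < x) :
    pvHterm nums k p x = 0 := by
  unfold pvHterm; rw [if_neg (by omega), if_neg (by omega)]

-- the map half of the loop invariant, one step
lemma pvStep_map (nums : List Int) (k : Int) (p : List Int) (x : Int)
    (m : PySem.Dict Int Int) (c : Int)
    (Hm : ∀ v, m.getD v 0 = (nums.count v : Int) - (pvConsumed nums k p v : Int)) :
    ∀ v, (pvBodyA k (m, c) x).1.getD v 0
      = (nums.count v : Int) - (pvConsumed nums k (p ++ [x]) v : Int) := by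
  intro v
  have Hmx := Hm x
  have Hmy := Hm (k - x)
  by_cases hx : x = k - x
  · -- self-complementary class
    rw [pvConsumed_self nums p hx] at Hmx
    have hcpxq : pvConsumed nums k (p ++ [x]) x
        = 2 * min (p.count x + 1) (nums.count x / 2) := by
      rw [pvConsumed_self nums (p ++ [x]) hx, pvCount_append, if_pos rfl]
    have hgen : ∀ w, w ≠ x → pvConsumed nums k (p ++ [x]) w = pvConsumed nums k p w := by
      intro w hw
      exact (pvConsumed_congr nums k w
        (by rw [pvCount_append, if_neg hw]; omega)
        (by rw [pvCount_append, if_neg (by intro h; exact hw (by omega))]; omega)).symm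
    by_cases hop : 2 ≤ m.getD x 0
    · have hred : (pvBodyA k (m, c) x).1 = (m.modify x 0 (· - 1)).modify (k - x) 0 (· - 1) := by
        simp only [pvBodyA]
        rw [if_pos ⟨by omega, by rw [← hx]; omega⟩, if_neg (by omega)]
      rw [hred, PySem.Dict.getD_modify, PySem.Dict.getD_modify, PySem.Dict.getD_modify]
      split_ifs with h1 h2 h3
      · have hv : v = x := by omega
        subst hv
        rw [hcpxq]
        omega
      · exact (h2 (by omega)).elim
      · exact (h1 (by omega)).elim
      · rw [hgen v h3]
        exact Hm v
    · have hred : (pvBodyA k (m, c) x).1 = m := by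
        simp only [pvBodyA]
        by_cases h0 : 0 < m.getD x 0
        · rw [if_pos ⟨h0, by rw [← hx]; omega⟩, if_pos ⟨hx, by omega⟩]
        · rw [if_neg (by omega)]
      rw [hred]
      by_cases hvx : v = x
      · subst hvx
        rw [hcpxq]
        omega
      · rw [hgen v hvx]
        exact Hm v
  · -- two distinct class members
    rw [pvConsumed_of_ne nums p hx] at Hmx
    rw [pvConsumed_pair nums k p x hx, pvConsumed_of_ne nums p hx] at Hmy
    have hcpxq : pvConsumed nums k (p ++ [x]) x
        = min (p.count x + 1 + p.count (k - x)) (min (nums.count x) (nums.count (k - x))) := by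
      rw [pvConsumed_of_ne nums (p ++ [x]) hx, pvCount_append, pvCount_append,
          if_pos rfl, if_neg (by omega)]
      omega
    have hcpyq : pvConsumed nums k (p ++ [x]) (k - x)
        = min (p.count x + 1 + p.count (k - x)) (min (nums.count x) (nums.count (k - x))) := by
      rw [pvConsumed_pair nums k (p ++ [x]) x hx]
      exact hcpxq
    have hgen : ∀ w, w ≠ x → w ≠ k - x → pvConsumed nums k (p ++ [x]) w = pvConsumed nums k p w := by
      intro w hw hwy
      exact (pvConsumed_congr nums k w
        (by rw [pvCount_append, if_neg hw]; omega)
        (by rw [pvCount_append, if_neg (by intro h; exact hwy (by omega))]; omega)).symm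
    by_cases hcond : 0 < m.getD x 0 ∧ 0 < m.getD (k - x) 0
    · obtain ⟨hc1, hc2⟩ := hcond
      have hred : (pvBodyA k (m, c) x).1 = (m.modify x 0 (· - 1)).modify (k - x) 0 (· - 1) := by
        simp only [pvBodyA]
        rw [if_pos ⟨hc1, hc2⟩, if_neg (by intro h; exact hx h.1)]
      rw [hred, PySem.Dict.getD_modify, PySem.Dict.getD_modify, PySem.Dict.getD_modify]
      split_ifs with h1 h2 h3
      · exact (hx (by omega)).elim
      · subst h1
        rw [hcpyq]
        omega
      · subst h3
        rw [hcpxq]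
        omega
      · rw [hgen v h3 h1]
        exact Hm v
    · have hred : (pvBodyA k (m, c) x).1 = m := by
        simp only [pvBodyA]
        rw [if_neg hcond]
      rw [hred]
      by_cases hvy : v = k - x
      · subst hvy
        rw [hcpyq]
        omega
      · by_cases hvx : v = x
        · subst hvx
          rw [hcpxq]
          omega
        · rw [hgen v hvx hvy]
          exact Hm v

-- the counter half of the loop invariant, one step
lemma pvStep_count (nums : List Int) (k : Int) (p : List Int) (x : Int)
    (hxmem : x ∈ nums)
    (m : PySem.Dict Int Int) (c : Int)
    (Hm : ∀ v, m.getD v 0 = (nums.count v : Int) - (pvConsumed nums k p v : Int))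
    (Hc : c = (pvHsum nums k p : Int)) :
    (pvBodyA k (m, c) x).2 = (pvHsum nums k (p ++ [x]) : Int) := by
  have Hmx := Hm x
  have Hmy := Hm (k - x)
  have hndS : (PySem.Set.ofList nums).Nodup := PySem.Set.nodup_ofList nums
  by_cases hx : x = k - x
  · rw [pvConsumed_self nums p hx] at Hmx
    have hmemS : x ∈ PySem.Set.ofList nums := (PySem.Set.mem_ofList nums x).mpr hxmem
    have hupd := pvSum_update (pvHterm nums k p) (pvHterm nums k (p ++ [x])) x
        (PySem.Set.ofList nums) hndS (by
      intro a haS hax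
      apply pvHterm_congr
      · rw [pvCount_append, if_neg hax]; omega
      · rw [pvCount_append, if_neg (by intro h; exact hax (by omega))]; omega)
    rw [if_pos hmemS, if_pos hmemS] at hupd
    have htp := pvHterm_eqc nums p hx
    have htq := pvHterm_eqc nums (p ++ [x]) hx
    rw [pvCount_append, if_pos rfl] at htq
    by_cases hop : 2 ≤ m.getD x 0
    · have hred : (pvBodyA k (m, c) x).2 = c + 1 := by
        simp only [pvBodyA]
        rw [if_pos ⟨by omega, by rw [← hx]; omega⟩, if_neg (by omega)]
      rw [hred, Hc]
      unfold pvHsum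
      omega
    · have hred : (pvBodyA k (m, c) x).2 = c := by
        simp only [pvBodyA]
        by_cases h0 : 0 < m.getD x 0
        · rw [if_pos ⟨h0, by rw [← hx]; omega⟩, if_pos ⟨hx, by omega⟩]
        · rw [if_neg (by omega)]
      rw [hred, Hc]
      unfold pvHsum
      omega
  · rw [pvConsumed_of_ne nums p hx] at Hmx
    rw [pvConsumed_pair nums k p x hx, pvConsumed_of_ne nums p hx] at Hmy
    -- the class is charged to the smaller of x and k - x
    by_cases hlt : x < k - x
    · have hmemS : x ∈ PySem.Set.ofList nums := (PySem.Set.mem_ofList nums x).mpr hxmem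
      have hupd := pvSum_update (pvHterm nums k p) (pvHterm nums k (p ++ [x])) x
          (PySem.Set.ofList nums) hndS (by
        intro a haS hax
        by_cases hay : a = k - x
        · subst hay
          rw [pvHterm_gt nums p (by omega), pvHterm_gt nums (p ++ [x]) (by omega)]
        · apply pvHterm_congr
          · rw [pvCount_append, if_neg hax]; omega
          · rw [pvCount_append, if_neg (by intro h; exact hay (by omega))]; omega)
      rw [if_pos hmemS, if_pos hmemS] at hupd
      have htp := pvHterm_lt nums p hlt
      have htq := pvHterm_lt nums (p ++ [x]) hlt
      rw [pvCount_append, pvCount_append, if_pos rfl, if_neg (by omega)] at htq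
      by_cases hcond : 0 < m.getD x 0 ∧ 0 < m.getD (k - x) 0
      · have hred : (pvBodyA k (m, c) x).2 = c + 1 := by
          simp only [pvBodyA]
          rw [if_pos hcond, if_neg (by intro h; exact hx h.1)]
        rw [hred, Hc]
        unfold pvHsum
        omega
      · have hred : (pvBodyA k (m, c) x).2 = c := by
          simp only [pvBodyA]
          rw [if_neg hcond]
        rw [hred, Hc]
        unfold pvHsum
        omega
    · have hgt : k - x < x := by omega
      have hupd := pvSum_update (pvHterm nums k p) (pvHterm nums k (p ++ [x])) (k - x)
          (PySem.Set.ofList nums) hndS (by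
        intro a haS hay
        by_cases hax : a = x
        · rw [hax, pvHterm_gt nums p hgt, pvHterm_gt nums (p ++ [x]) hgt]
        · apply pvHterm_congr
          · rw [pvCount_append, if_neg hax]; omega
          · rw [pvCount_append, if_neg (by intro h; exact hay (by omega))]; omega)
      have htp := pvHterm_lt (x := k - x) (k := k) nums p (show k - x < k - (k - x) by omega)
      have htq := pvHterm_lt (x := k - x) (k := k) nums (p ++ [x]) (show k - x < k - (k - x) by omega)
      rw [show k - (k - x) = x from by ring] at htp htq
      rw [pvCount_append, pvCount_append, if_pos rfl, if_neg (by omega)] at htq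
      by_cases hcond : 0 < m.getD x 0 ∧ 0 < m.getD (k - x) 0
      · have hmemS : (k - x) ∈ PySem.Set.ofList nums := by
          rw [PySem.Set.mem_ofList]
          have : 0 < nums.count (k - x) := by omega
          exact List.count_pos_iff.mp this
        rw [if_pos hmemS, if_pos hmemS] at hupd
        have hred : (pvBodyA k (m, c) x).2 = c + 1 := by
          simp only [pvBodyA]
          rw [if_pos hcond, if_neg (by intro h; exact hx h.1)]
        rw [hred, Hc]
        unfold pvHsum
        omega
      · have hred : (pvBodyA k (m, c) x).2 = c := by
          simp only [pvBodyA]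
          rw [if_neg hcond]
        rw [hred, Hc]
        by_cases hmemS : (k - x) ∈ PySem.Set.ofList nums
        · rw [if_pos hmemS, if_pos hmemS] at hupd
          unfold pvHsum
          omega
        · rw [if_neg hmemS, if_neg hmemS] at hupd
          unfold pvHsum
          omega

lemma pvLoopA (nums : List Int) (k : Int) :
    ∀ (s p : List Int) (m : PySem.Dict Int Int) (c : Int), nums = p ++ s →
    (∀ v, m.getD v 0 = (nums.count v : Int) - (pvConsumed nums k p v : Int)) →
    c = (pvHsum nums k p : Int) →
    (s.foldl (pvBodyA k) (m, c)).2 = (pvHsum nums k nums : Int) := by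
  intro s
  induction s with
  | nil =>
    intro p m c hp _ Hc
    simp only [List.append_nil] at hp
    subst hp
    simpa using Hc
  | cons x s ih =>
    intro p m c hp Hm Hc
    have hxmem : x ∈ nums := by rw [hp]; exact List.mem_append_right _ (List.mem_cons_self)
    rw [List.foldl_cons]
    have hbody : pvBodyA k (m, c) x = ((pvBodyA k (m, c) x).1, (pvBodyA k (m, c) x).2) := rfl
    rw [hbody]
    exact ih (p ++ [x]) _ _ (by rw [hp]; simp)
      (pvStep_map nums k p x m c Hm)
      (pvStep_count nums k p x hxmem m c Hm Hc)

lemma pvFoldB (cnt : PySem.Dict Int Int) (k : Int) (l : List Int) (t : Int) :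
    l.foldl (pvBodyB cnt k) t
      = t + (l.map (fun a => if a < k - a then min (cnt.getD a 0) (cnt.getD (k - a) 0)
            else if a = k - a then PySem.Int.floordiv (cnt.getD a 0) 2 else 0)).sum := by
  induction l generalizing t with
  | nil => simp
  | cons a l ih =>
    rw [List.foldl_cons, ih, List.map_cons, List.sum_cons]
    simp only [pvBodyB]
    split_ifs <;> ring

lemma pvFB_eq (nums : List Int) (k a : Int) :
    (if a < k - a then min ((PySem.Dict.counter nums).getD a 0) ((PySem.Dict.counter nums).getD (k - a) 0)
      else if a = k - a then PySem.Int.floordiv ((PySem.Dict.counter nums).getD a 0) 2 else 0)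
      = (pvHterm nums k nums a : Int) := by
  rw [PySem.Dict.getD_counter, PySem.Dict.getD_counter]
  unfold pvHterm
  split_ifs with h1 h2
  · push_cast; omega
  · rw [PySem.Int.floordiv_eq_ediv_of_pos (by omega)]
    push_cast
    omega
  · simp

lemma pvAltEq (nums : List Int) (k : Int) :
    maxOperations_bruteForce_alt nums k = (pvHsum nums k nums : Int) := by
  show List.foldl (pvBodyB (PySem.Dict.counter nums) k) 0 (PySem.Dict.counter nums).keys
      = (pvHsum nums k nums : Int)
  rw [PySem.Dict.keys_counter, pvFoldB]
  unfold pvHsum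
  rw [Nat.cast_list_sum, List.map_map, zero_add]
  apply congrArg
  apply List.map_congr_left
  intro a _
  exact pvFB_eq nums k a

-- ===== VERDICT (by name: the statement is the Claim_ definition above) =====
theorem maxOperations_bruteForce_spec : Claim_equal_maxOperations_bruteForce := by
  intro nums k _
  unfold Spec_maxOperations_bruteForce
  rw [pvAltEq]
  unfold maxOperations_bruteForce
  apply pvLoopA nums k nums [] _ _ (by simp)
  · intro v
    rw [PySem.Dict.getD_foldl_modify_add_one]
    unfold pvConsumed
    simp only [List.count_nil]
    split_ifs <;> simp [PySem.Dict.getD_empty]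
  · unfold pvHsum
    rw [show ((PySem.Set.ofList nums).map (pvHterm nums k [])).sum = 0 from
      List.sum_eq_zero (by
        intro x hx
        rcases List.mem_map.mp hx with ⟨a, _, rfl⟩
        unfold pvHterm
        simp only [List.count_nil]
        split_ifs <;> omega)]
    simp
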